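-- pv_equiv track=rewrite | github.com/crishN144/ailes-rag | 4_v2_update/reference/diagnostics/check_candidate_pool.py | find_target_ranks
-- ===== SOURCE A (Python) =====
-- def find_target_ranks(chunk_ids, targets):
--     """Return list of (target, rank-or-None)."""
--     out = []
--     for t in targets:
--         rank = None
--         for i, cid in enumerate(chunk_ids, 1):
--             if cid == t or cid.startswith(t):
--                 rank = i
--                 break
--         out.append((t, rank))
--     return out
-- ===== SOURCE B (Python) =====
-- def find_target_ranks(chunk_ids, targets):
--     """Return list of (target, rank-or-None)."""
--     first = {}
--     for i, cid in enumerate(chunk_ids, 1):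
--         for k in range(len(cid) + 1):
--             first.setdefault(cid[:k], i)
--     return [(t, first.get(t)) for t in targets]
-- ===== Notes on version B (the rewrite author's own statement) =====
-- stated objective: faster
-- what changed: B builds a prefix->earliest-rank dictionary over all prefixes of all chunk_ids once, then answers each target by a single dict lookup, instead of A's per-target linear startswith scan.
import Mathlib
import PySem

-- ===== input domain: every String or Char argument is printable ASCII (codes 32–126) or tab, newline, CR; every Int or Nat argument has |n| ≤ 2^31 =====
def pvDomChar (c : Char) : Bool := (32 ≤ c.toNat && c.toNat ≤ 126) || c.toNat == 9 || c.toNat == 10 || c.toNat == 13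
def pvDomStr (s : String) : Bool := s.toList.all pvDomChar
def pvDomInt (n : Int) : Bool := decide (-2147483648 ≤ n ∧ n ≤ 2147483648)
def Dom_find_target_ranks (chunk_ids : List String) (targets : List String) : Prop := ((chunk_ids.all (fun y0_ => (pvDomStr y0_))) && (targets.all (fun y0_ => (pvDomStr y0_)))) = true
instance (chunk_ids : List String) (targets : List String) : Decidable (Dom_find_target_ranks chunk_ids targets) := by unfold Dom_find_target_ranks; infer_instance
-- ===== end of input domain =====

-- B replaces A's per-target linear startswith scan by a prefix->earliest-rank dictionary built once.

-- ===== PORT A =====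
-- inner 'for i, cid in enumerate(chunk_ids, 1): if cid == t or cid.startswith(t): rank = i; break'
def pvScanA (chunk_ids : List String) (t : String) (i : Int) : Option Int :=
  match chunk_ids with
  | [] => none
  | cid :: rest =>
      if cid == t || PySem.Str.startswith cid t then some i else pvScanA rest t (i + 1)

def find_target_ranks (chunk_ids : List String) (targets : List String) : List (String × Option Int) :=
  targets.foldl (fun out t => out ++ [(t, pvScanA chunk_ids t 1)]) []

-- ===== PORT B =====
-- 'for k in range(len(cid)+1): first.setdefault(cid[:k], i)'
def pvAddChunk (d : PySem.Dict String Int) (i : Int) (cid : String) : PySem.Dict String Int :=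
  (List.range (cid.toList.length + 1)).foldl
    (fun d k => d.setdefault (String.ofList (cid.toList.take k)) i) d

-- 'for i, cid in enumerate(chunk_ids, 1): ...'
def pvBuildFirst (chunk_ids : List String) (i : Int) (d : PySem.Dict String Int) : PySem.Dict String Int :=
  match chunk_ids with
  | [] => d
  | cid :: rest => pvBuildFirst rest (i + 1) (pvAddChunk d i cid)

def find_target_ranks_alt (chunk_ids : List String) (targets : List String) : List (String × Option Int) :=
  let first := pvBuildFirst chunk_ids 1 PySem.Dict.empty
  targets.map (fun t => (t, first.get? t))

-- ===== PRECONDITION & SPEC =====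
def Spec_find_target_ranks (chunk_ids : List String) (targets : List String) (out : List (String × Option Int)) : Prop := out = find_target_ranks_alt chunk_ids targets
instance (chunk_ids : List String) (targets : List String) (out : List (String × Option Int)) : Decidable (Spec_find_target_ranks chunk_ids targets out) := by unfold Spec_find_target_ranks; infer_instance

-- ===== CLAIM (what is proved, stated in full; the proofs are below) =====
def Claim_equal_find_target_ranks : Prop := ∀ (chunk_ids : List String) (targets : List String), Dom_find_target_ranks chunk_ids targets → Spec_find_target_ranks chunk_ids targets (find_target_ranks chunk_ids targets)

-- ===== LEMMAS AND PROOFS =====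

-- membership of t in the prefix list of cid ↔ t.toList is a prefix of cid.toList
theorem pv_mem_prefixes (t : String) (cs : List Char) :
    (t ∈ (List.range (cs.length + 1)).map (fun k => String.ofList (cs.take k))) ↔ t.toList <+: cs := by
  constructor
  · rintro h
    simp only [List.mem_map, List.mem_range] at h
    obtain ⟨k, _, hk⟩ := h
    subst hk
    simpa [String.toList_ofList] using List.take_prefix k cs
  · intro h
    simp only [List.mem_map, List.mem_range]
    refine ⟨t.toList.length, ?_, ?_⟩
    · have := h.length_le; omega
    · rw [List.prefix_iff_eq_take] at h
      rw [← h, String.ofList_toList]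

-- setdefault over a list of keys with a constant value
theorem pv_get?_foldl_setdefault (ks : List String) (i : Int) (d : PySem.Dict String Int) (t : String) :
    (ks.foldl (fun d k => d.setdefault k i) d).get? t
      = (d.get? t).or (if t ∈ ks then some i else none) := by
  induction ks generalizing d with
  | nil => simp
  | cons k ks ih =>
    simp only [List.foldl_cons, ih]
    by_cases hk : t = k
    · subst hk
      rw [PySem.Dict.get?_setdefault_self]
      simp only [List.mem_cons, true_or, if_pos]
      cases d.get? t <;> simp
    · rw [PySem.Dict.get?_setdefault_of_ne d i (by exact hk)]
      simp only [List.mem_cons, hk, false_or]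

theorem pv_get?_addChunk (d : PySem.Dict String Int) (i : Int) (cid t : String) :
    (pvAddChunk d i cid).get? t
      = (d.get? t).or (if PySem.Str.startswith cid t then some i else none) := by
  unfold pvAddChunk
  have hfm := pv_get?_foldl_setdefault
      ((List.range (cid.toList.length + 1)).map fun k => String.ofList (cid.toList.take k)) i d t
  rw [List.foldl_map] at hfm
  rw [hfm]
  congr 1
  by_cases h : t.toList <+: cid.toList
  · rw [if_pos ((pv_mem_prefixes t cid.toList).2 h),
      if_pos (by simp [PySem.Str.startswith_eq]; exact (PySem.Chars.startswith_iff _ _).2 h)]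
  · rw [if_neg (fun hm => h ((pv_mem_prefixes t cid.toList).1 hm)),
      if_neg (by simp only [PySem.Str.startswith_eq, PySem.Chars.startswith_iff]; exact fun hs => h hs)]

theorem pv_get?_buildFirst (chunk_ids : List String) (i : Int) (d : PySem.Dict String Int) (t : String) :
    (pvBuildFirst chunk_ids i d).get? t = (d.get? t).or (pvScanA chunk_ids t i) := by
  induction chunk_ids generalizing i d with
  | nil => simp [pvBuildFirst, pvScanA]
  | cons cid rest ih =>
    simp only [pvBuildFirst, pvScanA, ih, pv_get?_addChunk]
    by_cases hs : PySem.Str.startswith cid t = true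
    · have heq : (cid == t || PySem.Str.startswith cid t) = true := by
        simp only [Bool.or_eq_true]; exact Or.inr hs
      rw [if_pos hs, heq, if_pos rfl]
      cases d.get? t <;> simp
    · have hne : cid ≠ t := by
        intro h; subst h
        exact hs (by simp only [PySem.Str.startswith_eq, PySem.Chars.startswith_iff]; exact List.prefix_rfl)
      have heq : (cid == t || PySem.Str.startswith cid t) = false := by
        rw [Bool.or_eq_false_iff]
        exact ⟨beq_eq_false_iff_ne.mpr hne, by simpa using hs⟩
      rw [if_neg hs, heq]
      simp only [Bool.false_eq_true, if_false]
      cases d.get? t <;> simp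

-- ===== VERDICT (by name: the statement is the Claim_ definition above) =====
theorem find_target_ranks_spec : Claim_equal_find_target_ranks := by
  intro chunk_ids targets _
  unfold Spec_find_target_ranks find_target_ranks find_target_ranks_alt
  rw [PySem.List.foldl_append_singleton_eq_map]
  apply List.map_congr_left
  intro t _
  rw [pv_get?_buildFirst]
  simp [PySem.Dict.empty]
  cases pvScanA chunk_ids t 1 <;> rfl
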